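-- pv_equiv track=rewrite | github.com/aavella77/interviews | src/move_zeroes_to_the_end.py | move_zeroes_1
-- ===== SOURCE A (Python) =====
-- def move_zeroes_1(input_string):
-- 	output_string = []
-- 	num_zeroes = 0
-- 	for char in input_string:
-- 		if char != "0":
-- 			output_string.append(char)
-- 		else:
-- 			num_zeroes += 1
-- 	for _ in range(num_zeroes):
-- 		output_string.append("0")
--
-- 	return "".join(output_string)
-- ===== SOURCE B (Python) =====
-- def move_zeroes_1(input_string):
--     # Stable sort by a two-valued key: non-'0' chars (key False) come first,
--     # '0' chars (key True) go last; stability keeps the original relative order.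
--     return "".join(sorted(input_string, key=lambda c: c == "0"))
-- ===== Notes on version B (the rewrite author's own statement) =====
-- stated objective: idiomatic
-- what changed: Replaced A's explicit partition loop (collect non-zeros, count zeros, append them) by a stable sort of the characters under the two-valued key c == '0', which moves the zeros to the end while stability preserves the order of the rest.
import Mathlib
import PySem

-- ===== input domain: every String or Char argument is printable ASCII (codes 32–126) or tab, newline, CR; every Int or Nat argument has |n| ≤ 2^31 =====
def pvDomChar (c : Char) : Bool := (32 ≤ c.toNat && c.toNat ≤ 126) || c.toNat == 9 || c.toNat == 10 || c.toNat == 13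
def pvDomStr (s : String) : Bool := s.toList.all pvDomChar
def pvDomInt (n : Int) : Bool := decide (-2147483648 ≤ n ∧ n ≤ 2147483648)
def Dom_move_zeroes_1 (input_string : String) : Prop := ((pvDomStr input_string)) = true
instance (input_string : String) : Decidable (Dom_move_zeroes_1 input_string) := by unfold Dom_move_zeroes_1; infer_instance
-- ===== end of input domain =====

-- B replaces A's explicit partition loop by a stable sort of the characters under
-- the two-valued key c == '0' (zeros sort last; stability keeps the rest in order).

-- ===== PORT A =====
-- loop over chars keeping (output_string, num_zeroes), then append num_zeroes zeros, then join
def move_zeroes_1 (input_string : String) : String :=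
  let st := input_string.toList.foldl
    (fun (acc : List Char × Nat) char =>
      if char ≠ '0' then (acc.1 ++ [char], acc.2) else (acc.1, acc.2 + 1))
    ([], 0)
  String.ofList (st.1 ++ List.replicate st.2 '0')

-- ===== PORT B =====
-- sorted(input_string, key=lambda c: c == "0"); Python bools order as False(0) < True(1)
def move_zeroes_1_alt (input_string : String) : String :=
  String.ofList (PySem.List.sorted input_string.toList
    (fun c => if c == '0' then (1 : Int) else 0) false)

-- ===== PRECONDITION & SPEC =====
def Spec_move_zeroes_1 (input_string : String) (out : String) : Prop := out = move_zeroes_1_alt input_string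
instance (input_string : String) (out : String) : Decidable (Spec_move_zeroes_1 input_string out) := by unfold Spec_move_zeroes_1; infer_instance

-- ===== CLAIM (what is proved, stated in full; the proofs are below) =====
def Claim_equal_move_zeroes_1 : Prop := ∀ (input_string : String), Dom_move_zeroes_1 input_string → Spec_move_zeroes_1 input_string (move_zeroes_1 input_string)

-- ===== LEMMAS AND PROOFS =====

-- A's loop computes the non-'0' chars in order and the number of '0's
theorem pv_foldA (l : List Char) (acc : List Char) (n : Nat) :
    l.foldl (fun (p : List Char × Nat) char =>
        if char ≠ '0' then (p.1 ++ [char], p.2) else (p.1, p.2 + 1)) (acc, n)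
      = (acc ++ l.filter (fun c => c != '0'), n + (l.filter (fun c => c == '0')).length) := by
  induction l generalizing acc n with
  | nil => simp
  | cons c t ih =>
    simp only [List.foldl_cons]
    by_cases h : c = '0'
    · rw [if_neg (by simp [h]), ih]
      simp [h]
      omega
    · rw [if_pos h, ih]
      simp [h]

-- the comparison used by the stable insertion sort with key c == '0'
def pvBefore (a b : Char) : Bool :=
  decide ((if a == '0' then (1 : Int) else 0) < (if b == '0' then (1 : Int) else 0))

-- inserting past a block it never goes before
theorem pv_insert_skip (x : Char) (A Z : List Char) (hA : ∀ a ∈ A, pvBefore x a = false) :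
    PySem.List.insertBy pvBefore x (A ++ Z) = A ++ PySem.List.insertBy pvBefore x Z := by
  induction A with
  | nil => simp
  | cons a t ih =>
    have hxa := hA a (by simp)
    simp only [List.cons_append, PySem.List.insertBy, hxa]
    simp only [Bool.false_eq_true, if_false]
    rw [ih (fun b hb => hA b (by simp [hb]))]

-- invariant of the insertion-sort fold: the accumulator stays (non-zeros ++ zeros)
theorem pv_fold_insert (l A Z : List Char)
    (hA : ∀ a ∈ A, a ≠ '0') (hZ : ∀ z ∈ Z, z = '0') :
    l.foldl (fun acc x => PySem.List.insertBy pvBefore x acc) (A ++ Z)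
      = (A ++ l.filter (fun c => c != '0')) ++ (Z ++ l.filter (fun c => c == '0')) := by
  induction l generalizing A Z with
  | nil => simp
  | cons c t ih =>
    simp only [List.foldl_cons]
    by_cases h : c = '0'
    · subst h
      have hstep : PySem.List.insertBy pvBefore '0' (A ++ Z) = (A ++ Z) ++ ['0'] := by
        apply PySem.List.insertBy_of_forall_not_before
        intro y _
        by_cases hy : y = '0' <;> simp [pvBefore, hy]
      rw [hstep, List.append_assoc, ih A (Z ++ ['0']) hA
        (by intro z hz; rcases List.mem_append.mp hz with h' | h'
            · exact hZ z h'
            · simpa using h')]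
      simp
    · have hstep : PySem.List.insertBy pvBefore c (A ++ Z) = (A ++ [c]) ++ Z := by
        rw [pv_insert_skip c A Z (by
          intro a ha
          have := hA a ha
          simp [pvBefore, this, h])]
        cases Z with
        | nil => simp [PySem.List.insertBy]
        | cons z zs =>
          have hz := hZ z (by simp)
          simp [PySem.List.insertBy, pvBefore, hz, h]
      rw [hstep, ih (A ++ [c]) Z
        (by intro a ha; rcases List.mem_append.mp ha with h' | h'
            · exact hA a h'
            · simp at h'; simpa [h'] using h) hZ]
      simp [h]

-- the stable sort is the partition: non-zeros in order, then the zeros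
theorem pv_sorted_partition (l : List Char) :
    PySem.List.sorted l (fun c => if c == '0' then (1 : Int) else 0) false
      = l.filter (fun c => c != '0') ++ l.filter (fun c => c == '0') := by
  rw [PySem.List.sorted_eq_foldl_insertBy]
  have := pv_fold_insert l [] [] (by simp) (by simp)
  simpa only [pvBefore, List.nil_append, List.append_nil] using this

-- every char of the zero-filter is '0', so that filter is a replicate of its length
theorem pv_zero_filter_replicate (l : List Char) :
    l.filter (fun c => c == '0') = List.replicate (l.filter (fun c => c == '0')).length '0' := by
  apply List.eq_replicate_of_mem
  intro b hb
  have := (List.mem_filter.mp hb).2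
  simpa using this

-- ===== VERDICT (by name: the statement is the Claim_ definition above) =====
theorem move_zeroes_1_spec : Claim_equal_move_zeroes_1 := by
  intro s _
  unfold Spec_move_zeroes_1 move_zeroes_1 move_zeroes_1_alt
  simp only [pv_foldA s.toList [] 0, pv_sorted_partition s.toList, List.nil_append,
    Nat.zero_add]
  rw [← pv_zero_filter_replicate s.toList]
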